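-- pv_equiv track=rewrite | github.com/o3junior/Scanalyzer | NShark/feature_extract.py | detect_sequential_ports
-- ===== SOURCE A (Python) =====
-- def detect_sequential_ports(ports):
--     """Detect if ports are accessed sequentially (scan indicator)"""
--     if len(ports) < 3:
--         return 0
--
--     sorted_ports = sorted(set(ports))
--     sequential_count = 0
--
--     for i in range(len(sorted_ports) - 2):
--         if sorted_ports[i+1] - sorted_ports[i] == 1 and sorted_ports[i+2] - sorted_ports[i+1] == 1:
--             sequential_count += 1
--
--     return sequential_count
-- ===== SOURCE B (Python) =====
-- def detect_sequential_ports(ports):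
--     """Detect if ports are accessed sequentially (scan indicator)"""
--     if len(ports) < 3:
--         return 0
--     s = set(ports)
--     return sum(1 for p in s if p + 1 in s and p + 2 in s)
-- ===== Notes on version B (the rewrite author's own statement) =====
-- stated objective: faster
-- what changed: Replaces sort-then-adjacent-index scan over sorted(set(ports)) with a single pass over the set counting ports p with p+1 and p+2 also present, using O(1) set membership instead of sorting.
import Mathlib
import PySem

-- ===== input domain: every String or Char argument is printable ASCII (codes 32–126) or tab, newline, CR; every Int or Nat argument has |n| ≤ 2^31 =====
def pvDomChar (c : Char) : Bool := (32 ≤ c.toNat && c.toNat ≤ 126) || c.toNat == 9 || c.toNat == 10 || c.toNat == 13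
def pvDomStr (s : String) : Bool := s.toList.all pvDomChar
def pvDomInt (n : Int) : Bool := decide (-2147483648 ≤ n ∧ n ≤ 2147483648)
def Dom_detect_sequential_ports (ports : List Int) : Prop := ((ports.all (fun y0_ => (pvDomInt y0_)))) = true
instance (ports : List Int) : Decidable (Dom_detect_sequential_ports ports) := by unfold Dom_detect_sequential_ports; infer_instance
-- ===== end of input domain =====

-- B replaces A's sort + adjacent-index scan by one pass over the port set with
-- membership tests for p+1 and p+2 (faster: no sort).


-- ===== PORT A =====
-- loop indices are always in range, so pyGetD's default 0 is never read
def detect_sequential_ports (ports : List Int) : Int :=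
  if ports.length < 3 then 0
  else
    let sorted_ports : List Int := PySem.List.sorted (PySem.Set.ofList ports) (fun x => x) false
    (PySem.List.pyRange 0 ((sorted_ports.length : Int) - 2) 1).foldl
      (fun acc i =>
        if PySem.List.pyGetD sorted_ports (i+1) 0 - PySem.List.pyGetD sorted_ports i 0 = 1
           ∧ PySem.List.pyGetD sorted_ports (i+2) 0 - PySem.List.pyGetD sorted_ports (i+1) 0 = 1
        then acc + 1 else acc) 0

-- ===== PORT B =====
def detect_sequential_ports_alt (ports : List Int) : Int :=
  if ports.length < 3 then 0
  else
    let s : List Int := PySem.Set.ofList ports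
    s.foldl (fun acc p => if s.contains (p + 1) ∧ s.contains (p + 2) then acc + 1 else acc) 0

-- ===== PRECONDITION & SPEC =====
def Spec_detect_sequential_ports (ports : List Int) (out : Int) : Prop := out = detect_sequential_ports_alt ports
instance (ports : List Int) (out : Int) : Decidable (Spec_detect_sequential_ports ports out) := by unfold Spec_detect_sequential_ports; infer_instance

-- ===== CLAIM (what is proved, stated in full; the proofs are below) =====
def Claim_equal_detect_sequential_ports : Prop := ∀ (ports : List Int), Dom_detect_sequential_ports ports → Spec_detect_sequential_ports ports (detect_sequential_ports ports)

-- ===== LEMMAS AND PROOFS =====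

-- proof-only helpers
def pvIdxOk (l : List Int) (i : Nat) : Bool :=
  decide (l.getD (i+1) 0 - l.getD i 0 = 1 ∧ l.getD (i+2) 0 - l.getD (i+1) 0 = 1)

def pvMemOk (l : List Int) (p : Int) : Bool := l.contains (p + 1) && l.contains (p + 2)

def pvTrip : List Int → Nat
  | a :: b :: c :: r => (if b - a = 1 ∧ c - b = 1 then 1 else 0) + pvTrip (b :: c :: r)
  | _ => 0

-- A's index loop equals countP over the Nat range
theorem pvA_loop_eq (l : List Int) :
    (PySem.List.pyRange 0 ((l.length : Int) - 2) 1).foldl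
      (fun acc i =>
        if PySem.List.pyGetD l (i+1) 0 - PySem.List.pyGetD l i 0 = 1
           ∧ PySem.List.pyGetD l (i+2) 0 - PySem.List.pyGetD l (i+1) 0 = 1
        then acc + 1 else acc) 0
    = ((List.range (l.length - 2)).countP (pvIdxOk l) : Int) := by
  rcases Nat.lt_or_ge l.length 2 with h2 | h2
  · match l, h2 with
    | [], _ => norm_num [PySem.List.pyRange]
    | [a], _ => norm_num [PySem.List.pyRange]
  · obtain ⟨m, hm⟩ : ∃ m, l.length = m + 2 := ⟨l.length - 2, by omega⟩
    have h1 : (l.length : Int) - 2 = ((m : Nat) : Int) := by rw [hm]; push_cast; ring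
    have h2' : l.length - 2 = m := by omega
    rw [h1, PySem.List.pyRange_zero_natCast, List.foldl_map, h2']
    have hfun : (fun (acc : Int) (k : Nat) =>
        if PySem.List.pyGetD l ((k : Int)+1) 0 - PySem.List.pyGetD l (k : Int) 0 = 1
           ∧ PySem.List.pyGetD l ((k : Int)+2) 0 - PySem.List.pyGetD l ((k : Int)+1) 0 = 1
        then acc + 1 else acc)
        = fun acc k => if pvIdxOk l k = true then acc + 1 else acc := by
      funext acc k
      have e1 : ((k : Int) + 1) = ((k + 1 : Nat) : Int) := by push_cast; ring
      have e2 : ((k : Int) + 2) = ((k + 2 : Nat) : Int) := by push_cast; ring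
      rw [e1, e2, PySem.List.pyGetD_natCast, PySem.List.pyGetD_natCast, PySem.List.pyGetD_natCast]
      simp [pvIdxOk]
    rw [hfun, PySem.List.foldl_count_if]
    simp

-- range countP equals the structural triple count
theorem pvRange_eq_trip (l : List Int) :
    (List.range (l.length - 2)).countP (pvIdxOk l) = pvTrip l := by
  induction l using pvTrip.induct with
  | case1 a b c r ih =>
    have hlen : (a::b::c::r).length - 2 = ((b::c::r).length - 2) + 1 := by simp
    rw [hlen, List.range_succ_eq_map, List.countP_cons, List.countP_map]
    have hcomp : ((pvIdxOk (a::b::c::r)) ∘ Nat.succ) = pvIdxOk (b::c::r) := by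
      funext k; simp [pvIdxOk, Function.comp]
    rw [hcomp, ih]
    show pvTrip (b::c::r) + _ = _
    simp [pvTrip, pvIdxOk]
    omega
  | case2 x h =>
    match x, h with
    | [], _ => rfl
    | [a], _ => rfl
    | [a,b], _ => rfl
    | a::b::c::r, h => exact absurd rfl (h a b c r)

-- on a strictly increasing list the triple count is the membership count
theorem pvTrip_eq_memOk (l : List Int) (h : l.Pairwise (· < ·)) :
    pvTrip l = l.countP (pvMemOk l) := by
  revert h
  induction l using pvTrip.induct with
  | case1 a b c r ih =>
    intro h
    rw [List.pairwise_cons] at h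
    obtain ⟨ha, htail⟩ := h
    have hb : a < b := ha b (by simp)
    have hc : b < c := (List.pairwise_cons.1 htail).1 c (by simp)
    have hr : ∀ y ∈ r, c < y := (List.pairwise_cons.1 (List.pairwise_cons.1 htail).2).1
    have hcongr : ∀ x ∈ b :: c :: r, pvMemOk (a :: b :: c :: r) x = pvMemOk (b :: c :: r) x := by
      intro x hx
      have hax : a < x := ha x hx
      simp only [pvMemOk, List.contains_cons]
      have e1 : (x + 1 == a) = false := by simp; omega
      have e2 : (x + 2 == a) = false := by simp; omega
      rw [e1, e2]; simp
    have hhead : (pvMemOk (a :: b :: c :: r) a = true) ↔ (b - a = 1 ∧ c - b = 1) := by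
      simp only [pvMemOk, Bool.and_eq_true, List.contains_iff_mem, List.mem_cons]
      constructor
      · rintro ⟨h1, h2⟩
        have hb1 : b = a + 1 := by
          rcases h1 with h1 | h1 | h1 | h1 <;> try omega
          · exact absurd (hr _ h1) (by omega)
        have hc1 : c = a + 2 := by
          rcases h2 with h2 | h2 | h2 | h2 <;> try omega
          · exact absurd (hr _ h2) (by omega)
        omega
      · rintro ⟨h1, h2⟩
        exact ⟨Or.inr (Or.inl (by omega)), Or.inr (Or.inr (Or.inl (by omega)))⟩

    rw [List.countP_cons, List.countP_congr (fun x hx => by rw [hcongr x hx]), ← ih htail]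
    show (if b - a = 1 ∧ c - b = 1 then 1 else 0) + pvTrip (b::c::r) = pvTrip (b::c::r) + _
    by_cases hd : b - a = 1 ∧ c - b = 1
    · rw [if_pos hd, if_pos (hhead.2 hd)]; omega
    · rw [if_neg hd, if_neg (by intro hh; exact hd (hhead.1 hh))]; omega
  | case2 x hm =>
    intro h
    match x, hm, h with
    | [], _, _ => rfl
    | [a], _, _ => simp [pvTrip, pvMemOk]
    | [a, b], _, h =>
      have hab : a < b := (List.pairwise_cons.1 h).1 b (by simp)
      simp only [pvTrip, pvMemOk, List.countP_cons, List.countP_nil, List.contains_cons,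
        List.contains_nil]
      simp [beq_iff_eq]
      rw [if_neg (by omega), if_neg (by omega)]
    | a::b::c::r, hm, _ => exact absurd rfl (hm a b c r)


-- ===== VERDICT (by name: the statement is the Claim_ definition above) =====
theorem detect_sequential_ports_spec : Claim_equal_detect_sequential_ports := by
  intro ports _
  unfold Spec_detect_sequential_ports detect_sequential_ports detect_sequential_ports_alt
  by_cases h3 : ports.length < 3
  · simp [h3]
  · simp only [h3, if_false]
    set s : List Int := PySem.Set.ofList ports with hs
    set l : List Int := PySem.List.sorted s (fun x => x) false with hl
    have hperm : l.Perm s := PySem.List.sorted_perm s (fun x => x) false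
    have hmem : pvMemOk l = pvMemOk s := by
      funext x; simp [pvMemOk, hperm.mem_iff]
    have hB : s.foldl (fun acc p => if s.contains (p + 1) ∧ s.contains (p + 2) then acc + 1 else acc) 0
        = ((s.countP (pvMemOk s) : Nat) : Int) := by
      have := PySem.List.foldl_count_if (pvMemOk s) s 0
      simpa [pvMemOk, Bool.and_eq_true, decide_eq_true_eq] using this
    rw [pvA_loop_eq l, pvRange_eq_trip l,
      pvTrip_eq_memOk l (PySem.List.sorted_ofList_pairwise_lt ports), hmem,
      hperm.countP_eq, hB]
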